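-- pv_equiv track=rewrite | github.com/Imonymous/Practice | Graphs/count_basins.py | get_sink
-- ===== SOURCE A (Python) =====
-- def get_sink(matrix, cell, seen, path_so_far):
--     m = len(matrix)
--     n = len(matrix[0])
--     moves = [[0, -1], [-1, 0], [0, 1], [1, 0]]
--
--     path_so_far.append(cell)
--
--     if cell in seen.keys():
--         return seen[cell]
--
--     min_nbr_cell_x = cell[0]
--     min_nbr_cell_y = cell[1]
--
--     for move in moves:
--         if cell[0]+move[0] in range(m) and cell[1]+move[1] in range(n):
--             if matrix[cell[0]+move[0]][cell[1]+move[1]] < matrix[min_nbr_cell_x][min_nbr_cell_y]: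
--                 min_nbr_cell_x = cell[0]+move[0]
--                 min_nbr_cell_y = cell[1]+move[1]
--
--     if matrix[cell[0]][cell[1]] == matrix[min_nbr_cell_x][min_nbr_cell_y]:
--         return cell
--     else:
--         if (min_nbr_cell_x, min_nbr_cell_y) in seen.keys():
--             return seen[(min_nbr_cell_x, min_nbr_cell_y)]
--         else:
--             return get_sink(matrix, (min_nbr_cell_x, min_nbr_cell_y), seen, path_so_far)
-- ===== SOURCE B (Python) =====
-- def _descent_chain(matrix, cell):
--     """Pure phase 1: the steepest-descent chain from cell down to its local sink."""
--     m, n = len(matrix), len(matrix[0])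
--     x, y = cell
--     cands = [(x, y)] + [(i, j) for (i, j) in ((x, y - 1), (x - 1, y), (x, y + 1), (x + 1, y))
--                         if 0 <= i < m and 0 <= j < n]
--     nxt = min(cands, key=lambda c: matrix[c[0]][c[1]])
--     if nxt == (x, y):
--         return [(x, y)]
--     return [(x, y)] + _descent_chain(matrix, nxt)
--
-- def get_sink(matrix, cell, seen, path_so_far):
--     path_so_far.append(cell)
--     if cell in seen:
--         return seen[cell]
--     chain = _descent_chain(matrix, cell)
--     last = cell
--     for nxt in chain[1:]:
--         if nxt in seen:
--             return seen[nxt]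
--         path_so_far.append(nxt)
--         last = nxt
--     return last
-- ===== Notes on version B (the rewrite author's own statement) =====
-- stated objective: alternative
-- what changed: Splits A's single interleaved recursion into two phases: a pure recursive builder that materialises the whole steepest-descent chain (next cell = min() over [cell]+in-bounds neighbours) and then a separate linear scan over that chain that applies the seen-memo rules and returns the last cell otherwise.
-- outside the precondition, e.g. on get_sink([[0, 2], [1]], (0, 0), {}, []): A returns (0, 0), B returns (0, 0)
import Mathlib
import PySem

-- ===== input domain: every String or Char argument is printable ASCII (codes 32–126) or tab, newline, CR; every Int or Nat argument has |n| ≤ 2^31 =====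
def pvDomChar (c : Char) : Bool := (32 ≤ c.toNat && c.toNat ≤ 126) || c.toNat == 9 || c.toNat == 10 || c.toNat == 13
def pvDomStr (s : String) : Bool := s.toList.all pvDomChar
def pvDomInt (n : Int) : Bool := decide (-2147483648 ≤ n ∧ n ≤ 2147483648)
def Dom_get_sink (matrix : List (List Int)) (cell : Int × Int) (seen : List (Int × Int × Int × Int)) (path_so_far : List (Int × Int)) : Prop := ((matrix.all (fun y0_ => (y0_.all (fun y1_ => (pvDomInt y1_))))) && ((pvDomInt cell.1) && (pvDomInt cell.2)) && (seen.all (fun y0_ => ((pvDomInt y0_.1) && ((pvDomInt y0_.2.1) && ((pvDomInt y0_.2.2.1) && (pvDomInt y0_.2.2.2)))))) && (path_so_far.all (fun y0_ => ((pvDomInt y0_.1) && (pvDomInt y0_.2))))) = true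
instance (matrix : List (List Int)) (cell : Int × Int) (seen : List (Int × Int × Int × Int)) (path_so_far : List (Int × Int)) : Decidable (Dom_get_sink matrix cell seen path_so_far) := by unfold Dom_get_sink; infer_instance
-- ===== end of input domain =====

-- B splits A's single interleaved recursion into two phases: a pure recursive builder of the whole
-- steepest-descent chain, then a separate linear scan of that chain applying the seen-memo rules
-- (objective: alternative decomposition, same cost). Both Pythons append the same cells to
-- path_so_far in the same order (an in-place mutation); the equivalence proved here is about the RETURN value.

-- ===== PORT A =====
-- matrix[i][j] with Python indexing (negative wrap); default never reached inside Pre_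
def pvMatA (matrix : List (List Int)) (i j : Int) : Int :=
  (PySem.List.pyGet? ((PySem.List.pyGet? matrix i).getD []) j).getD 0

-- 'cell in seen.keys()' / 'seen[cell]' : first-match association-list lookup
def pvSeenA (seen : List (Int × Int × Int × Int)) (c : Int × Int) : Option (Int × Int) :=
  match seen with
  | [] => none
  | (a, b, v) :: t => if (a, b) = c then some v else pvSeenA t c

-- the 'for move in moves' loop with the two nested ifs, keeping (min_nbr_cell_x, min_nbr_cell_y)
def pvStepA (matrix : List (List Int)) (m n : Int) (cell : Int × Int) : Int × Int :=
  [((0 : Int), (-1 : Int)), (-1, 0), (0, 1), (1, 0)].foldl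
    (fun best mv =>
      if 0 ≤ cell.1 + mv.1 ∧ cell.1 + mv.1 < m ∧ 0 ≤ cell.2 + mv.2 ∧ cell.2 + mv.2 < n then
        if pvMatA matrix (cell.1 + mv.1) (cell.2 + mv.2) < pvMatA matrix best.1 best.2 then
          (cell.1 + mv.1, cell.2 + mv.2)
        else best
      else best)
    cell

-- A's recursion, with a fuel guard for totality (m*n+1 steps always suffice inside Pre_:
-- the matrix value strictly decreases along the walk, so no cell repeats)
def pvGoA (matrix : List (List Int)) (m n : Int) :
    Nat → Int × Int → List (Int × Int × Int × Int) → List (Int × Int) → Int × Int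
  | 0, cell, _, _ => cell
  | fuel + 1, cell, seen, path =>
    let path' := path ++ [cell]      -- path_so_far.append(cell)
    match pvSeenA seen cell with
    | some v => v
    | none =>
      let mn := pvStepA matrix m n cell
      if pvMatA matrix cell.1 cell.2 = pvMatA matrix mn.1 mn.2 then cell
      else
        match pvSeenA seen mn with
        | some v => v
        | none => pvGoA matrix m n fuel mn seen path'

def get_sink (matrix : List (List Int)) (cell : Int × Int) (seen : List (Int × Int × Int × Int)) (path_so_far : List (Int × Int)) : Int × Int :=
  pvGoA matrix matrix.length (matrix.headD []).length
    (matrix.length * (matrix.headD []).length + 1) cell seen path_so_far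

-- ===== PORT B =====
-- matrix[c[0]][c[1]], the min() key
def pvValB (matrix : List (List Int)) (c : Int × Int) : Int :=
  (PySem.List.pyGet? ((PySem.List.pyGet? matrix c.1).getD []) c.2).getD 0

-- 'c in seen' / 'seen[c]' via a single find?
def pvSeenB (seen : List (Int × Int × Int × Int)) (c : Int × Int) : Option (Int × Int) :=
  (seen.find? (fun e => (e.1, e.2.1) == c)).map (fun e => e.2.2)

-- cands = [(x, y)] + [(i, j) for (i, j) in … if 0 <= i < m and 0 <= j < n]
def pvCandsB (m n x y : Int) : List (Int × Int) :=
  (x, y) :: ([(x, y - 1), (x - 1, y), (x, y + 1), (x + 1, y)].filter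
      (fun c => decide (0 ≤ c.1) && decide (c.1 < m) && decide (0 ≤ c.2) && decide (c.2 < n)))

-- phase 1: _descent_chain, a pure recursion producing the whole chain; fuel guard for totality
-- (m*n+1 suffices inside Pre_: the value strictly decreases along the chain, so no cell repeats)
def pvChainB (matrix : List (List Int)) (m n : Int) : Nat → Int × Int → List (Int × Int)
  | 0, c => [c]
  | fuel + 1, c =>
    let nxt := (PySem.List.min? (pvCandsB m n c.1 c.2) (pvValB matrix)).getD c
    if nxt = c then [c] else c :: pvChainB matrix m n fuel nxt

-- phase 2: the 'for nxt in chain[1:]' scan, carrying 'last'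
def pvScanB (seen : List (Int × Int × Int × Int)) : Int × Int → List (Int × Int) → Int × Int
  | last, [] => last
  | _, c :: t =>
    match pvSeenB seen c with
    | some v => v
    | none => pvScanB seen c t

def get_sink_alt (matrix : List (List Int)) (cell : Int × Int) (seen : List (Int × Int × Int × Int)) (path_so_far : List (Int × Int)) : Int × Int :=
  match pvSeenB seen cell with
  | some v => v
  | none =>
    let chain := pvChainB matrix matrix.length (matrix.headD []).length
      (matrix.length * (matrix.headD []).length + 1) cell
    pvScanB seen cell (chain.drop 1)

-- ===== PRECONDITION & SPEC =====
-- Pre_ excludes exactly the inputs where Python A can raise IndexError: an empty matrix, a start cell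
-- outside Python's (negative-wrapping) index range, and matrices with a row shorter than the first row —
-- on those, whether A raises depends on the path the walk takes, which no closed-form condition can
-- follow, so rows at least as long as the first are required (this excludes some such inputs on which A
-- happens to return); a start cell that is a key of seen only needs a nonempty matrix (A returns at once).
def Pre_get_sink (matrix : List (List Int)) (cell : Int × Int) (seen : List (Int × Int × Int × Int)) (path_so_far : List (Int × Int)) : Prop :=
  matrix ≠ [] ∧
  ((∃ e ∈ seen, ((e.1, e.2.1) : Int × Int) = cell) ∨
    ((∀ row ∈ matrix, (matrix.headD []).length ≤ row.length) ∧
     -(matrix.length : Int) ≤ cell.1 ∧ cell.1 < matrix.length ∧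
     ((0 < (matrix.headD []).length ∧
        -((matrix.headD []).length : Int) ≤ cell.2 ∧ cell.2 < (matrix.headD []).length) ∨
      ((matrix.headD []).length = 0 ∧
        -(((PySem.List.pyGet? matrix cell.1).getD []).length : Int) ≤ cell.2 ∧
        cell.2 < ((PySem.List.pyGet? matrix cell.1).getD []).length))))
instance (matrix : List (List Int)) (cell : Int × Int) (seen : List (Int × Int × Int × Int)) (path_so_far : List (Int × Int)) : Decidable (Pre_get_sink matrix cell seen path_so_far) := by unfold Pre_get_sink; infer_instance

def pvWitness_get_sink : List (List Int) × (Int × Int) × (List (Int × Int × Int × Int)) × (List (Int × Int)) :=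
  ([[3, 1], [2, 0]], (0, 0), [], [])

def Spec_get_sink (matrix : List (List Int)) (cell : Int × Int) (seen : List (Int × Int × Int × Int)) (path_so_far : List (Int × Int)) (out : Int × Int) : Prop := out = get_sink_alt matrix cell seen path_so_far
instance (matrix : List (List Int)) (cell : Int × Int) (seen : List (Int × Int × Int × Int)) (path_so_far : List (Int × Int)) (out : Int × Int) : Decidable (Spec_get_sink matrix cell seen path_so_far out) := by unfold Spec_get_sink; infer_instance

-- ===== CLAIM (what is proved, stated in full; the proofs are below) =====
def Claim_equal_get_sink : Prop := ∀ (matrix : List (List Int)) (cell : Int × Int) (seen : List (Int × Int × Int × Int)) (path_so_far : List (Int × Int)), Dom_get_sink matrix cell seen path_so_far → Pre_get_sink matrix cell seen path_so_far → Spec_get_sink matrix cell seen path_so_far (get_sink matrix cell seen path_so_far)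

-- ===== LEMMAS AND PROOFS =====
theorem pvSeen_eq (s : List (Int × Int × Int × Int)) (c : Int × Int) : pvSeenA s c = pvSeenB s c := by
  induction s with
  | nil => rfl
  | cons e t ih =>
    obtain ⟨a, b, v⟩ := e
    by_cases h : (a, b) = c
    · simp [pvSeenA, pvSeenB, h]
    · have hb : ¬ ((((a, b, v) : Int × Int × Int × Int).1, ((a, b, v) : Int × Int × Int × Int).2.1) == c) = true := by
        simpa using h
      simp only [pvSeenA, pvSeenB, List.find?_cons, if_neg h, hb] at ih ⊢
      exact ih

-- min over a nonempty list is the strict-< fold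
theorem pvMin?_cons {α : Type} (key : α → Int) (a : α) (l : List α) :
    PySem.List.min? (a :: l) key
      = some (l.foldl (fun b c => if key c < key b then c else b) a) := by
  show List.foldl _ (some a) l = _
  induction l generalizing a with
  | nil => rfl
  | cons h t ih =>
    simp only [List.foldl]
    by_cases hc : key h < key a <;> simp [hc, ih]

-- the strict-< fold either keeps its seed or strictly lowers the key
theorem pvFold_min_lt {α : Type} (key : α → Int) (l : List α) (a : α) :
    l.foldl (fun b c => if key c < key b then c else b) a = a ∨
      key (l.foldl (fun b c => if key c < key b then c else b) a) < key a := by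
  induction l generalizing a with
  | nil => exact Or.inl rfl
  | cons h t ih =>
    simp only [List.foldl]
    by_cases hc : key h < key a
    · rw [if_pos hc]
      rcases ih h with e | hlt
      · right; rw [e]; exact hc
      · right; exact lt_trans hlt hc
    · rw [if_neg hc]; exact ih a

theorem pvMat_val (matrix : List (List Int)) (i j : Int) :
    pvMatA matrix i j = pvValB matrix (i, j) := rfl

-- A's guarded scan over the four moves = the strict-< fold over B's filtered candidate tail
theorem pvStepA_eq_fold (matrix : List (List Int)) (m n x y : Int) :
    pvStepA matrix m n (x, y)
      = ([((x : Int), y - 1), (x - 1, y), (x, y + 1), (x + 1, y)].filter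
            (fun c => decide (0 ≤ c.1) && decide (c.1 < m) && decide (0 ≤ c.2) && decide (c.2 < n))).foldl
          (fun b c => if pvValB matrix c < pvValB matrix b then c else b) (x, y) := by
  rw [List.foldl_filter]
  simp only [pvStepA, List.foldl, pvMat_val, Bool.and_eq_true, decide_eq_true_eq]
  have e1 : x + 0 = x := by ring
  have e2 : y + -1 = y - 1 := by ring
  have e3 : x + -1 = x - 1 := by ring
  have e4 : y + 0 = y := by ring
  rw [e1, e2, e3, e4]
  norm_num [and_assoc]

-- B's next cell equals A's (min_nbr_cell_x, min_nbr_cell_y)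
theorem pvStep_eq (matrix : List (List Int)) (m n x y : Int) :
    (PySem.List.min? (pvCandsB m n x y) (pvValB matrix)).getD (x, y)
      = pvStepA matrix m n (x, y) := by
  rw [pvCandsB, pvMin?_cons, pvStepA_eq_fold]
  rfl

-- the chain always starts at its argument cell
theorem pvChain_head (matrix : List (List Int)) (m n : Int) (f : Nat) (c : Int × Int) :
    pvChainB matrix m n f c = c :: (pvChainB matrix m n f c).drop 1 := by
  cases f with
  | zero => rfl
  | succ g =>
    simp only [pvChainB]
    split <;> rfl

-- the heart: A's interleaved recursion = scan of B's pre-built chain, once the start cell is unseen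
theorem pvGoA_eq_scan (matrix : List (List Int)) (m n : Int)
    (seen : List (Int × Int × Int × Int)) (f : Nat) :
    ∀ (cell : Int × Int) (path : List (Int × Int)), pvSeenB seen cell = none →
      pvGoA matrix m n f cell seen path
        = pvScanB seen cell ((pvChainB matrix m n f cell).drop 1) := by
  induction f with
  | zero => intro cell path _; rfl
  | succ g ih =>
    intro cell path hcell
    obtain ⟨x, y⟩ := cell
    simp only [pvGoA, pvChainB, pvSeen_eq, hcell]
    rw [pvStep_eq]
    set mn := pvStepA matrix m n (x, y) with hmn
    have hprop : mn = (x, y) ∨ pvValB matrix mn < pvValB matrix (x, y) := by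
      rw [hmn, pvStepA_eq_fold]
      exact pvFold_min_lt (pvValB matrix) _ (x, y)
    rcases hprop with he | hlt
    · rw [he]
      simp [pvMat_val, pvScanB]
    · have hne : mn ≠ (x, y) := by
        intro h; rw [h] at hlt; exact lt_irrefl _ hlt
      have hveq : ¬ pvMatA matrix x y = pvMatA matrix mn.1 mn.2 := by
        rw [pvMat_val, pvMat_val]
        intro h
        have : pvValB matrix (mn.1, mn.2) < pvValB matrix (x, y) := hlt
        omega
      rw [if_neg hne, if_neg (by simpa using hveq)]
      rw [List.drop_one, List.tail_cons]
      rw [pvChain_head matrix m n g mn, pvScanB]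
      cases hs : pvSeenB seen mn with
      | some v => rfl
      | none => exact ih mn (path ++ [(x, y)]) hs

-- ===== VERDICT (by name: the statement is the Claim_ definition above) =====
theorem get_sink_spec : Claim_equal_get_sink := by
  intro matrix cell seen path _ _
  unfold Spec_get_sink get_sink get_sink_alt
  cases hs : pvSeenB seen cell with
  | some v =>
    have : pvSeenA seen cell = some v := by rw [pvSeen_eq, hs]
    simp [pvGoA, this]
  | none =>
        exact pvGoA_eq_scan matrix _ _ seen _ cell path hs
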